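-- pv_equiv track=rewrite | github.com/Bhanuch2006/cyberforensic_hackathon_vit | app/services/mitre_mapper.py | _determine_kill_chain_phase
-- ===== SOURCE A (Python) =====
-- from typing import Dict, List
--
-- def _determine_kill_chain_phase(tactics: List[Dict]) -> str:
--     """Determine Lockheed Martin Cyber Kill Chain phase"""
--     tactic_names = [t['name'] for t in tactics]
--
--     if 'Reconnaissance' in tactic_names:
--         return 'Reconnaissance'
--     elif 'Initial Access' in tactic_names:
--         return 'Weaponization/Delivery'
--     elif 'Execution' in tactic_names or 'Persistence' in tactic_names:
--         return 'Exploitation/Installation'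
--     elif 'Credential Access' in tactic_names or 'Privilege Escalation' in tactic_names:
--         return 'Installation/Command & Control'
--     elif 'Lateral Movement' in tactic_names or 'Discovery' in tactic_names:
--         return 'Command & Control'
--     elif 'Exfiltration' in tactic_names or 'Collection' in tactic_names:
--         return 'Actions on Objectives'
--     elif 'Impact' in tactic_names:
--         return 'Actions on Objectives'
--     else:
--         return 'Unknown'
-- ===== SOURCE B (Python) =====
-- from typing import Dict, List
--
-- _PHASE_TABLE = {
--     'Reconnaissance': (0, 'Reconnaissance'),
--     'Initial Access': (1, 'Weaponization/Delivery'),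
--     'Execution': (2, 'Exploitation/Installation'),
--     'Persistence': (2, 'Exploitation/Installation'),
--     'Credential Access': (3, 'Installation/Command & Control'),
--     'Privilege Escalation': (3, 'Installation/Command & Control'),
--     'Lateral Movement': (4, 'Command & Control'),
--     'Discovery': (4, 'Command & Control'),
--     'Exfiltration': (5, 'Actions on Objectives'),
--     'Collection': (5, 'Actions on Objectives'),
--     'Impact': (6, 'Actions on Objectives'),
-- }
--
-- def _determine_kill_chain_phase(tactics: List[Dict]) -> str:
--     """Determine Lockheed Martin Cyber Kill Chain phase (table-driven)."""
--     tactic_names = [t['name'] for t in tactics]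
--     best = None
--     for name in tactic_names:
--         entry = _PHASE_TABLE.get(name)
--         if entry is not None and (best is None or entry[0] < best[0]):
--             best = entry
--     return best[1] if best is not None else 'Unknown'
-- ===== Notes on version B (the rewrite author's own statement) =====
-- stated objective: alternative
-- what changed: Replaced the eleven-branch if/elif membership chain (each branch scanning the name list again) with a single priority table and one pass over the names keeping the minimum-priority entry.
import Mathlib
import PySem

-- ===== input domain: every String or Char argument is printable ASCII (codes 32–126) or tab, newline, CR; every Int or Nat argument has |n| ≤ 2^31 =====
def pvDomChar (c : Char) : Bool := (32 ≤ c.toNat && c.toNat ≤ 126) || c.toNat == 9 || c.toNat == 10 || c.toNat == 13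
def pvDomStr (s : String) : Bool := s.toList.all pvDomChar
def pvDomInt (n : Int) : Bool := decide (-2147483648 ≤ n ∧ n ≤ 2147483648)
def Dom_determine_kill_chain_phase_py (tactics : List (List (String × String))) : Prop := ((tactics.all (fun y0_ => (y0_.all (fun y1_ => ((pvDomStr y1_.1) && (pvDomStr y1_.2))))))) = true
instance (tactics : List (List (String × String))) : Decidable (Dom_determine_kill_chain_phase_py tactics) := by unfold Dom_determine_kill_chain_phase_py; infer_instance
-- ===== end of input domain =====

-- B replaces A's eleven-branch if/elif membership chain by a priority table and one
-- minimum-selection pass over the names (objective: alternative, same result).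
-- Both ports read t['name'] as a first-match lookup; Pre_ excludes elements lacking a
-- "name" key, where the Python raises KeyError.

-- ===== PORT A =====
-- t['name'] (KeyError excluded by Pre_)
def pvNameOf (t : List (String × String)) : String :=
  ((PySem.Dict.mk t).get? "name").getD ""

-- Python's 'x in names' membership scan
def pvMemS (x : String) : List String → Bool
  | [] => false
  | n :: r => if n = x then true else pvMemS x r

def determine_kill_chain_phase_py (tactics : List (List (String × String))) : String :=
  let tactic_names := tactics.map pvNameOf
  if pvMemS "Reconnaissance" tactic_names then "Reconnaissance"
  else if pvMemS "Initial Access" tactic_names then "Weaponization/Delivery"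
  else if pvMemS "Execution" tactic_names || pvMemS "Persistence" tactic_names then "Exploitation/Installation"
  else if pvMemS "Credential Access" tactic_names || pvMemS "Privilege Escalation" tactic_names then "Installation/Command & Control"
  else if pvMemS "Lateral Movement" tactic_names || pvMemS "Discovery" tactic_names then "Command & Control"
  else if pvMemS "Exfiltration" tactic_names || pvMemS "Collection" tactic_names then "Actions on Objectives"
  else if pvMemS "Impact" tactic_names then "Actions on Objectives"
  else "Unknown"

-- ===== PORT B =====
-- _PHASE_TABLE.get(name)
def pvPrio? (n : String) : Option (Int × String) :=
  if n = "Reconnaissance" then some (0, "Reconnaissance")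
  else if n = "Initial Access" then some (1, "Weaponization/Delivery")
  else if n = "Execution" then some (2, "Exploitation/Installation")
  else if n = "Persistence" then some (2, "Exploitation/Installation")
  else if n = "Credential Access" then some (3, "Installation/Command & Control")
  else if n = "Privilege Escalation" then some (3, "Installation/Command & Control")
  else if n = "Lateral Movement" then some (4, "Command & Control")
  else if n = "Discovery" then some (4, "Command & Control")
  else if n = "Exfiltration" then some (5, "Actions on Objectives")
  else if n = "Collection" then some (5, "Actions on Objectives")
  else if n = "Impact" then some (6, "Actions on Objectives")
  else none

-- one iteration of B's loop over the names
def pvStep (best : Option (Int × String)) (name : String) : Option (Int × String) :=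
  match pvPrio? name with
  | none => best
  | some entry =>
    match best with
    | none => some entry
    | some b => if entry.1 < b.1 then some entry else best

def determine_kill_chain_phase_py_alt (tactics : List (List (String × String))) : String :=
  let tactic_names := tactics.map pvNameOf
  match tactic_names.foldl pvStep none with
  | some b => b.2
  | none => "Unknown"

-- ===== PRECONDITION & SPEC =====
-- Pre_ excludes inputs where some tactic dict has no "name" key: there Python A (and B) raise KeyError.
def Pre_determine_kill_chain_phase_py (tactics : List (List (String × String))) : Prop :=
  ∀ t ∈ tactics, ((PySem.Dict.mk t).get? "name").isSome = true
instance (tactics : List (List (String × String))) : Decidable (Pre_determine_kill_chain_phase_py tactics) := by unfold Pre_determine_kill_chain_phase_py; infer_instance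
def pvWitness_determine_kill_chain_phase_py : (List (List (String × String))) := [[("name", "Execution")], [("name", "Impact")]]

def Spec_determine_kill_chain_phase_py (tactics : List (List (String × String))) (out : String) : Prop := out = determine_kill_chain_phase_py_alt tactics
instance (tactics : List (List (String × String))) (out : String) : Decidable (Spec_determine_kill_chain_phase_py tactics out) := by unfold Spec_determine_kill_chain_phase_py; infer_instance

-- ===== CLAIM (what is proved, stated in full; the proofs are below) =====
def Claim_equal_determine_kill_chain_phase_py : Prop := ∀ (tactics : List (List (String × String))), Dom_determine_kill_chain_phase_py tactics → Pre_determine_kill_chain_phase_py tactics → Spec_determine_kill_chain_phase_py tactics (determine_kill_chain_phase_py tactics)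

-- ===== LEMMAS AND PROOFS =====

-- merge of two candidate (priority, phase) options, smaller priority wins, tie → left
def pvCombine : Option (Int × String) → Option (Int × String) → Option (Int × String)
  | a, none => a
  | none, some p => some p
  | some b, some p => if p.1 < b.1 then some p else some b

-- the canonical best entry determined by the seven "priority k is present" booleans
def pvMc (c0 c1 c2 c3 c4 c5 c6 : Bool) : Option (Int × String) :=
  if c0 then some (0, "Reconnaissance")
  else if c1 then some (1, "Weaponization/Delivery")
  else if c2 then some (2, "Exploitation/Installation")
  else if c3 then some (3, "Installation/Command & Control")
  else if c4 then some (4, "Command & Control")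
  else if c5 then some (5, "Actions on Objectives")
  else if c6 then some (6, "Actions on Objectives")
  else none

theorem pvStep_eq (acc : Option (Int × String)) (n : String) :
    pvStep acc n = pvCombine acc (pvPrio? n) := by
  rcases h : pvPrio? n with _ | p <;> rcases acc with _ | b <;>
    simp [pvStep, pvCombine, h]

theorem pvCombine_none_left (x : Option (Int × String)) : pvCombine none x = x := by
  rcases x with _ | p <;> rfl

theorem pvCombine_assoc (a b c : Option (Int × String)) :
    pvCombine (pvCombine a b) c = pvCombine a (pvCombine b c) := by
  rcases a with _ | a <;> rcases b with _ | b <;> rcases c with _ | c <;>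
    simp only [pvCombine] <;> split_ifs <;>
    first
      | rfl
      | (exfalso; omega)
      | (simp only [pvCombine] <;> split_ifs <;> first | rfl | (exfalso; omega))

theorem pvStepL (n : String) (m0 m1 m2 m3 m4 m5 m6 m7 m8 m9 m10 : Bool) :
    pvCombine (pvPrio? n) (pvMc m0 m1 (m2 || m3) (m4 || m5) (m6 || m7) (m8 || m9) m10)
      = pvMc (if n = "Reconnaissance" then true else m0)
             (if n = "Initial Access" then true else m1)
             ((if n = "Execution" then true else m2) || (if n = "Persistence" then true else m3))
             ((if n = "Credential Access" then true else m4) || (if n = "Privilege Escalation" then true else m5))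
             ((if n = "Lateral Movement" then true else m6) || (if n = "Discovery" then true else m7))
             ((if n = "Exfiltration" then true else m8) || (if n = "Collection" then true else m9))
             (if n = "Impact" then true else m10) := by
  by_cases h0 : n = "Reconnaissance"
  · subst h0; revert m0 m1 m2 m3 m4 m5 m6 m7 m8 m9 m10; decide
  by_cases h1 : n = "Initial Access"
  · subst h1; revert m0 m1 m2 m3 m4 m5 m6 m7 m8 m9 m10; decide
  by_cases h2 : n = "Execution"
  · subst h2; revert m0 m1 m2 m3 m4 m5 m6 m7 m8 m9 m10; decide
  by_cases h3 : n = "Persistence"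
  · subst h3; revert m0 m1 m2 m3 m4 m5 m6 m7 m8 m9 m10; decide
  by_cases h4 : n = "Credential Access"
  · subst h4; revert m0 m1 m2 m3 m4 m5 m6 m7 m8 m9 m10; decide
  by_cases h5 : n = "Privilege Escalation"
  · subst h5; revert m0 m1 m2 m3 m4 m5 m6 m7 m8 m9 m10; decide
  by_cases h6 : n = "Lateral Movement"
  · subst h6; revert m0 m1 m2 m3 m4 m5 m6 m7 m8 m9 m10; decide
  by_cases h7 : n = "Discovery"
  · subst h7; revert m0 m1 m2 m3 m4 m5 m6 m7 m8 m9 m10; decide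
  by_cases h8 : n = "Exfiltration"
  · subst h8; revert m0 m1 m2 m3 m4 m5 m6 m7 m8 m9 m10; decide
  by_cases h9 : n = "Collection"
  · subst h9; revert m0 m1 m2 m3 m4 m5 m6 m7 m8 m9 m10; decide
  by_cases h10 : n = "Impact"
  · subst h10; revert m0 m1 m2 m3 m4 m5 m6 m7 m8 m9 m10; decide
  · simp [pvPrio?, h0, h1, h2, h3, h4, h5, h6, h7, h8, h9, h10, pvCombine_none_left]

theorem pvFold_eq_Mc (names : List String) (acc : Option (Int × String)) :
    names.foldl pvStep acc
      = pvCombine acc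
          (pvMc (pvMemS "Reconnaissance" names)
                (pvMemS "Initial Access" names)
                (pvMemS "Execution" names || pvMemS "Persistence" names)
                (pvMemS "Credential Access" names || pvMemS "Privilege Escalation" names)
                (pvMemS "Lateral Movement" names || pvMemS "Discovery" names)
                (pvMemS "Exfiltration" names || pvMemS "Collection" names)
                (pvMemS "Impact" names)) := by
  induction names generalizing acc with
  | nil => rcases acc with _ | b <;> rfl
  | cons n r ih =>
    show List.foldl pvStep (pvStep acc n) r = _
    rw [ih, pvStep_eq, pvCombine_assoc, pvStepL]
    rfl

theorem pvChain_eq_Mc (c0 c1 c2 c3 c4 c5 c6 : Bool) :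
    (if c0 then "Reconnaissance"
     else if c1 then "Weaponization/Delivery"
     else if c2 then "Exploitation/Installation"
     else if c3 then "Installation/Command & Control"
     else if c4 then "Command & Control"
     else if c5 then "Actions on Objectives"
     else if c6 then "Actions on Objectives"
     else "Unknown")
      = (match pvMc c0 c1 c2 c3 c4 c5 c6 with
         | some b => b.2
         | none => "Unknown") := by
  revert c0 c1 c2 c3 c4 c5 c6; decide

theorem pvMain (names : List String) :
    (if pvMemS "Reconnaissance" names then "Reconnaissance"
     else if pvMemS "Initial Access" names then "Weaponization/Delivery"
     else if pvMemS "Execution" names || pvMemS "Persistence" names then "Exploitation/Installation"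
     else if pvMemS "Credential Access" names || pvMemS "Privilege Escalation" names then "Installation/Command & Control"
     else if pvMemS "Lateral Movement" names || pvMemS "Discovery" names then "Command & Control"
     else if pvMemS "Exfiltration" names || pvMemS "Collection" names then "Actions on Objectives"
     else if pvMemS "Impact" names then "Actions on Objectives"
     else "Unknown")
      = (match names.foldl pvStep none with
         | some b => b.2
         | none => "Unknown") := by
  rw [pvFold_eq_Mc, pvCombine_none_left, pvChain_eq_Mc]

-- ===== VERDICT (by name: the statement is the Claim_ definition above) =====
theorem determine_kill_chain_phase_py_spec : Claim_equal_determine_kill_chain_phase_py := by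
  intro tactics _ _
  exact pvMain (tactics.map pvNameOf)
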